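-- pv_equiv track=rewrite | github.com/Cista-123/Prog_1_Bead | task_29.py | Sorozat_N_Edik_tagja
-- ===== SOURCE A (Python) =====
-- def Sorozat_N_Edik_tagja(n):
--     sorozat = [1]
--     while len(sorozat) < n:
--         sum = 0
--         for i in range(len(sorozat)):
--             seged_string = str(sorozat[i])
--             for y in range(len(seged_string)):
--                 sum+=int(seged_string[y])
--         sorozat.append(sum)
--
--
--     return sorozat
-- ===== SOURCE B (Python) =====
-- def Sorozat_N_Edik_tagja(n):
--     # Faster: maintain the running digit-sum total incrementally (O(n*d))
--     # instead of re-scanning the whole sequence for every new term.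
--     sorozat = [1]
--     total = 1  # digit sum of all terms so far
--     while len(sorozat) < n:
--         sorozat.append(total)
--         t = total
--         while t:
--             total += t % 10
--             t //= 10
--     return sorozat
-- ===== Notes on version B (the rewrite author's own statement) =====
-- stated objective: faster
-- what changed: B keeps a running total of the digit sums and, after appending each new term, adds only that term's digit sum arithmetically (%10,//10), instead of re-converting every previous term to a string and re-summing all its digit characters on every iteration.
import Mathlib
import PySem

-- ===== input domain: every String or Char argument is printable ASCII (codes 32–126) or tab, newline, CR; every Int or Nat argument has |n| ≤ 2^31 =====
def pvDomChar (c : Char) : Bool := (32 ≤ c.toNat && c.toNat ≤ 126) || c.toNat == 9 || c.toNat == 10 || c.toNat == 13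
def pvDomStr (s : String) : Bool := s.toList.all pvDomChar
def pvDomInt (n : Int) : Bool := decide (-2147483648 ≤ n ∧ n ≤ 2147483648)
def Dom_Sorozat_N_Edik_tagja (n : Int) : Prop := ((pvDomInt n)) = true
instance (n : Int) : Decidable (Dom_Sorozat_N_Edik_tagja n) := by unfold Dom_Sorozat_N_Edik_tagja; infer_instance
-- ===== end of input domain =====

-- B replaces A's per-iteration re-scan of the whole sequence (string-converting every
-- term and summing its digit characters) by one running total updated arithmetically:
-- objective "faster" (O(n*d) instead of O(n^2*d)).

-- ===== PORT A =====

-- int(seged_string[y]) for one character (always a decimal digit here)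
def pvChVal (c : Char) : Int := (PySem.Int.ofChars? [c]).getD 0

-- sum += int(seged_string[y]) over the characters of str(v)
def pvChFold (cs : List Char) (s : Int) : Int := cs.foldl (fun s c => s + pvChVal c) s

-- the body of A's while loop: recompute sum from scratch, then append it
def pvSumA (l : List Int) : Int :=
  l.foldl (fun s v => pvChFold (PySem.Int.toStr v).toList s) 0

def pvLoopA (n : Int) (sorozat : List Int) : List Int :=
  if sorozat.length < n then pvLoopA n (sorozat ++ [pvSumA sorozat]) else sorozat
termination_by (n - sorozat.length).toNat
decreasing_by simp only [List.length_append, List.length_cons, List.length_nil]; omega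

def Sorozat_N_Edik_tagja (n : Int) : List Int := pvLoopA n [1]

-- ===== PORT B =====

-- Source B's inner `while t: total += t % 10; t //= 10` (adds the digit sum of t)
def pvDigitSumB (t : Int) : Int :=
  if _h : 0 < t then PySem.Int.mod t 10 + pvDigitSumB (PySem.Int.floordiv t 10) else 0
termination_by t.toNat
decreasing_by
  rw [PySem.Int.floordiv_eq_ediv_of_pos (by omega)]
  omega

def pvLoopB (n : Int) (sorozat : List Int) (total : Int) : List Int :=
  if sorozat.length < n then pvLoopB n (sorozat ++ [total]) (total + pvDigitSumB total)
  else sorozat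
termination_by (n - sorozat.length).toNat
decreasing_by simp only [List.length_append, List.length_cons, List.length_nil]; omega

def Sorozat_N_Edik_tagja_alt (n : Int) : List Int := pvLoopB n [1] 1

-- ===== PRECONDITION & SPEC =====
def Spec_Sorozat_N_Edik_tagja (n : Int) (out : List Int) : Prop := out = Sorozat_N_Edik_tagja_alt n
instance (n : Int) (out : List Int) : Decidable (Spec_Sorozat_N_Edik_tagja n out) := by unfold Spec_Sorozat_N_Edik_tagja; infer_instance

-- ===== CLAIM (what is proved, stated in full; the proofs are below) =====
def Claim_equal_Sorozat_N_Edik_tagja : Prop := ∀ (n : Int), Dom_Sorozat_N_Edik_tagja n → Spec_Sorozat_N_Edik_tagja n (Sorozat_N_Edik_tagja n)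

-- ===== LEMMAS AND PROOFS =====

-- digit sum of all elements, the value B's running total maintains
def pvDsList (l : List Int) : Int := (l.map pvDigitSumB).sum

lemma pvChVal_digitChar (d : Nat) (hd : d < 10) : pvChVal (Nat.digitChar d) = d := by
  interval_cases d <;> decide

-- toDigitsCore with a nonempty accumulator splits off the accumulator
lemma pvCore_append (f : Nat) : ∀ (m : Nat) (ds : List Char),
    Nat.toDigitsCore 10 f m ds = Nat.toDigitsCore 10 f m [] ++ ds := by
  induction f with
  | zero => intro m ds; simp [Nat.toDigitsCore]
  | succ f ih =>
    intro m ds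
    simp only [Nat.toDigitsCore]
    split
    · rfl
    · rw [ih (m / 10) [Nat.digitChar (m % 10)], ih (m / 10) (Nat.digitChar (m % 10) :: ds)]
      simp

-- fuel independence of toDigitsCore (enough fuel)
lemma pvCore_fuel : ∀ (m f₁ f₂ : Nat), m < f₁ → m < f₂ → ∀ ds,
    Nat.toDigitsCore 10 f₁ m ds = Nat.toDigitsCore 10 f₂ m ds := by
  intro m
  induction m using Nat.strong_induction_on with
  | _ m ih =>
    intro f₁ f₂ h₁ h₂ ds
    match f₁, f₂ with
    | g₁ + 1, g₂ + 1 =>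
      simp only [Nat.toDigitsCore]
      split
      · rfl
      · exact ih (m / 10) (by omega) g₁ g₂ (by omega) (by omega) _

lemma pvDigitSumB_unfold (t : Int) (ht : 0 < t) :
    pvDigitSumB t = PySem.Int.mod t 10 + pvDigitSumB (PySem.Int.floordiv t 10) := by
  rw [pvDigitSumB]; simp [ht]

-- the char-sum of str(m) is the arithmetic digit sum
lemma pvChFold_toDigits : ∀ (m : Nat) (s : Int),
    pvChFold (Nat.toDigits 10 m) s = s + pvDigitSumB (m : Int) := by
  intro m
  induction m using Nat.strong_induction_on with
  | _ m ih =>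
    intro s
    unfold Nat.toDigits
    simp only [Nat.toDigitsCore]
    split
    · rename_i h0
      simp only [pvChFold, List.foldl_cons, List.foldl_nil,
        pvChVal_digitChar (m % 10) (by omega)]
      by_cases hm : 0 < (m : Int)
      · rw [pvDigitSumB_unfold _ hm]
        have : (m : Int) / 10 = 0 := by omega
        rw [PySem.Int.floordiv_eq_ediv_of_pos (by omega), this, pvDigitSumB]
        simp only [lt_irrefl, dite_false]
        rw [PySem.Int.mod_eq_emod_of_pos (by omega)]
        omega
      · have : m = 0 := by omega
        subst this
        rw [pvDigitSumB]
        norm_num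
    · rename_i h0
      rw [pvCore_fuel (m / 10) m (m / 10 + 1) (by omega) (by omega),
        pvCore_append]
      show pvChFold (Nat.toDigits 10 (m / 10) ++ [Nat.digitChar (m % 10)]) s = _
      simp only [pvChFold, List.foldl_append, List.foldl_cons, List.foldl_nil]
      rw [show (Nat.toDigits 10 (m/10)).foldl (fun s c => s + pvChVal c) s
            = pvChFold (Nat.toDigits 10 (m/10)) s from rfl, ih (m / 10) (by omega) s]
      rw [pvChVal_digitChar (m % 10) (by omega)]
      have hm : 0 < (m : Int) := by omega
      rw [pvDigitSumB_unfold _ hm, PySem.Int.mod_eq_emod_of_pos (by omega),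
        PySem.Int.floordiv_eq_ediv_of_pos (by omega)]
      have h1 : ((m : Int)) % 10 = ((m % 10 : Nat) : Int) := by omega
      have h2 : ((m : Int)) / 10 = ((m / 10 : Nat) : Int) := by omega
      rw [h1, h2]
      ring

lemma pvChFold_toStr (v : Int) (hv : 1 ≤ v) (s : Int) :
    pvChFold (PySem.Int.toStr v).toList s = s + pvDigitSumB v := by
  rw [PySem.Int.toList_toStr]
  have : PySem.Int.toChars v = Nat.toDigits 10 v.toNat := by
    simp [PySem.Int.toChars]; omega
  rw [this, pvChFold_toDigits, Int.toNat_of_nonneg (by omega)]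

-- A's recomputed sum equals B's running total
lemma pvSumA_from (l : List Int) : ∀ (s : Int), (∀ v ∈ l, 1 ≤ v) →
    l.foldl (fun s v => pvChFold (PySem.Int.toStr v).toList s) s = s + pvDsList l := by
  induction l with
  | nil => intro s _; simp [pvDsList]
  | cons x xs ih =>
    intro s h
    simp only [List.foldl_cons]
    rw [pvChFold_toStr x (h x (by simp)) s, ih _ (fun v hv => h v (by simp [hv]))]
    simp [pvDsList]; ring

lemma pvSumA_eq (l : List Int) (h : ∀ v ∈ l, 1 ≤ v) : pvSumA l = pvDsList l := by
  unfold pvSumA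
  rw [pvSumA_from l 0 h]
  ring

lemma pvDigitSumB_pos_aux : ∀ (m : Nat) (v : Int), v.toNat = m → 1 ≤ v → 1 ≤ pvDigitSumB v := by
  intro m
  induction m using Nat.strong_induction_on with
  | _ m ih =>
    intro v hm hv
    rw [pvDigitSumB_unfold v (by omega), PySem.Int.mod_eq_emod_of_pos (by omega),
      PySem.Int.floordiv_eq_ediv_of_pos (by omega)]
    by_cases h10 : v < 10
    · have : v / 10 = 0 := by omega
      rw [this, pvDigitSumB]
      simp only [lt_irrefl, dite_false]
      omega
    · have h1 := ih (v / 10).toNat (by omega) (v / 10) rfl (by omega)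
      omega

lemma pvDigitSumB_pos (v : Int) (hv : 1 ≤ v) : 1 ≤ pvDigitSumB v :=
  pvDigitSumB_pos_aux v.toNat v rfl hv

lemma pvDsList_pos (l : List Int) (hne : l ≠ []) (h : ∀ v ∈ l, 1 ≤ v) : 1 ≤ pvDsList l := by
  match l with
  | x :: xs =>
    have hx := pvDigitSumB_pos x (h x (by simp))
    have : 0 ≤ (xs.map pvDigitSumB).sum := by
      apply List.sum_nonneg
      intro a ha
      obtain ⟨v, hv, rfl⟩ := List.mem_map.mp ha
      exact le_of_lt (lt_of_lt_of_le Int.zero_lt_one (pvDigitSumB_pos v (h v (by simp [hv]))))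
    simp only [pvDsList, List.map_cons, List.sum_cons]
    omega

lemma pvDsList_append (l : List Int) (t : Int) :
    pvDsList (l ++ [t]) = pvDsList l + pvDigitSumB t := by
  simp [pvDsList]

lemma pvLoop_eq (n : Int) : ∀ (k : Nat) (l : List Int), (n - l.length).toNat = k →
    l ≠ [] → (∀ v ∈ l, 1 ≤ v) → pvLoopA n l = pvLoopB n l (pvDsList l) := by
  intro k
  induction k using Nat.strong_induction_on with
  | _ k ih =>
    intro l hk hne hpos
    rw [pvLoopA, pvLoopB]
    by_cases hlt : l.length < n
    · rw [if_pos hlt, if_pos hlt, pvSumA_eq l hpos]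
      set t := pvDsList l with ht
      have htpos : 1 ≤ t := pvDsList_pos l hne hpos
      have hstep : pvDsList (l ++ [t]) = t + pvDigitSumB t := by
        rw [pvDsList_append]
      rw [← hstep]
      apply ih ((n - (l ++ [t]).length).toNat) _ _ rfl (by simp)
      · intro v hv
        rcases List.mem_append.mp hv with h | h
        · exact hpos v h
        · simp at h; omega
      · simp only [List.length_append, List.length_cons, List.length_nil]
        omega
    · rw [if_neg hlt, if_neg hlt]

-- ===== VERDICT (by name: the statement is the Claim_ definition above) =====
theorem Sorozat_N_Edik_tagja_spec : Claim_equal_Sorozat_N_Edik_tagja := by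
  intro n _
  unfold Spec_Sorozat_N_Edik_tagja Sorozat_N_Edik_tagja Sorozat_N_Edik_tagja_alt
  have h0 : pvDigitSumB 0 = 0 := by rw [pvDigitSumB]; simp
  have h1 : pvDsList [1] = 1 := by
    simp only [pvDsList, List.map_cons, List.map_nil, List.sum_cons, List.sum_nil]
    rw [pvDigitSumB_unfold 1 (by omega), PySem.Int.mod_eq_emod_of_pos (by omega),
      PySem.Int.floordiv_eq_ediv_of_pos (by omega)]
    norm_num [h0]
  have := pvLoop_eq n _ [1] rfl (by simp) (by intro v hv; simp at hv; omega)
  rwa [h1] at this
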